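-- pv_equiv track=rewrite | github.com/kastnerp/CampusMicroclimateAndWeather | helper_functions.py | get_eval_hours
-- ===== SOURCE A (Python) =====
-- def get_eval_hours(hour_start, hour_end, day_start, day_end, month_start,
--                    month_end):
--     # count from 1
--     if (month_end > 12):
--         month_end = 12
--     if (day_end > 31):
--         day_end = 31
--     if (hour_end > 24):
--         hour_end = 24
--
--     cnt = 0
--     hoursToEvaluate = []
--
--     for m in range(12):  # 0-11
--         for d in range(31):  # 0-30
--             for h in range(24):  # 0-23
--
--                 # Check if already gone through month
--
--                 if (m == 2 and d > 27):
--                     continue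
--                 elif ((m == 4 or m == 6 or m == 9 or m == 10) and d > 29):
--                     continue
--
--                 # Fill list
--                 cnt += 1
--
--                 if (m >= month_start and m < month_end and d >= day_start
--                         and d < day_end and h >= hour_start and h < hour_end):
--                     hoursToEvaluate.append(cnt)
--
--     return hoursToEvaluate
-- ===== SOURCE B (Python) =====
-- def get_eval_hours(hour_start, hour_end, day_start, day_end, month_start,
--                    month_end):
--     # per-month valid-day table matching the original's skip rules
--     days = [31, 31, 28, 31, 30, 31, 30, 31, 31, 30, 30, 31]
--     # prefix[m] = number of valid calendar hours before month m
--     prefix = [0] * 13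
--     for m in range(12):
--         prefix[m + 1] = prefix[m] + days[m] * 24
--
--     month_end = min(month_end, 12)
--     day_end = min(day_end, 31)
--     hour_end = min(hour_end, 24)
--
--     out = []
--     for m in range(max(0, month_start), month_end):
--         for d in range(max(0, day_start), min(day_end, days[m])):
--             base = prefix[m] + d * 24
--             for h in range(max(0, hour_start), hour_end):
--                 out.append(base + h + 1)
--     return out
-- ===== Notes on version B (the rewrite author's own statement) =====
-- stated objective: faster
-- what changed: B replaces A's exhaustive 12x31x24 grid scan with a running counter by a per-month cumulative-hours prefix table and loops only over the clamped requested month/day/hour ranges, computing each ordinal in closed form as prefix[m] + d*24 + h + 1.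
import Mathlib
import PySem

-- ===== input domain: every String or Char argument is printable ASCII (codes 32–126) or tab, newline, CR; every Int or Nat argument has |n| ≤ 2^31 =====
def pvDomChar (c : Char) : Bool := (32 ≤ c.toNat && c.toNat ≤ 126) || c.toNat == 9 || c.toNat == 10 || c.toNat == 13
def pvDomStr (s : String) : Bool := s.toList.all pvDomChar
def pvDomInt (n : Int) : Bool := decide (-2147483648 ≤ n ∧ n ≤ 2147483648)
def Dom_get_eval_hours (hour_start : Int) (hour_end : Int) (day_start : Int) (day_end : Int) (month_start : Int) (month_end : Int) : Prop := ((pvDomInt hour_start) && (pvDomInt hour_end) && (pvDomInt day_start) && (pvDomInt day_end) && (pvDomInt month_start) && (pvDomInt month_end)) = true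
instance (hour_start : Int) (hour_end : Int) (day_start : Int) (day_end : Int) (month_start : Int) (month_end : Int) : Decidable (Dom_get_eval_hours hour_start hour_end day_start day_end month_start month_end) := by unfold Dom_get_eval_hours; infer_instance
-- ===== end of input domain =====

-- B replaces A's full 12×31×24 grid scan with a running counter by a per-month
-- cumulative-hours table and loops only over the clamped requested ranges,
-- computing each ordinal in closed form (objective: faster; same return value).

-- ===== PORT A =====
def get_eval_hours (hour_start : Int) (hour_end : Int) (day_start : Int) (day_end : Int) (month_start : Int) (month_end : Int) : List Int :=
  let month_end := if month_end > 12 then 12 else month_end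
  let day_end := if day_end > 31 then 31 else day_end
  let hour_end := if hour_end > 24 then 24 else hour_end
  ((PySem.List.pyRange 0 12 1).foldl (fun st m =>
    (PySem.List.pyRange 0 31 1).foldl (fun st d =>
      (PySem.List.pyRange 0 24 1).foldl (fun st h =>
        if m = 2 ∧ d > 27 then st
        else if (m = 4 ∨ m = 6 ∨ m = 9 ∨ m = 10) ∧ d > 29 then st
        else
          let cnt := st.1 + 1
          if m ≥ month_start ∧ m < month_end ∧ d ≥ day_start ∧ d < day_end ∧
              h ≥ hour_start ∧ h < hour_end then
            (cnt, st.2 ++ [cnt])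
          else (cnt, st.2)) st) st) ((0 : Int), ([] : List Int))).2

-- ===== PORT B =====
-- B-side helpers: the per-month valid-day table and the cumulative-hours table
-- (built by Source B's 'for m in range(12)' loop; the index m+1 is always positive,
-- so '.set (m+1).toNat' is exact for Python's 'prefix[m+1] = …').
def pvDaysB : List Int := [31, 31, 28, 31, 30, 31, 30, 31, 31, 30, 30, 31]

def pvPrefixB : List Int :=
  (PySem.List.pyRange 0 12 1).foldl
    (fun p m => p.set (m + 1).toNat
      (PySem.List.pyGetD p m 0 + PySem.List.pyGetD pvDaysB m 0 * 24))
    (List.replicate 13 (0 : Int))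

def get_eval_hours_alt (hour_start : Int) (hour_end : Int) (day_start : Int) (day_end : Int) (month_start : Int) (month_end : Int) : List Int :=
  let month_end := min month_end 12
  let day_end := min day_end 31
  let hour_end := min hour_end 24
  (PySem.List.pyRange (max 0 month_start) month_end 1).foldl (fun out m =>
    (PySem.List.pyRange (max 0 day_start) (min day_end (PySem.List.pyGetD pvDaysB m 0)) 1).foldl (fun out d =>
      let base := PySem.List.pyGetD pvPrefixB m 0 + d * 24
      (PySem.List.pyRange (max 0 hour_start) hour_end 1).foldl (fun out h =>
        out ++ [base + h + 1]) out) out) []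

-- ===== PRECONDITION & SPEC =====
def Spec_get_eval_hours (hour_start : Int) (hour_end : Int) (day_start : Int) (day_end : Int) (month_start : Int) (month_end : Int) (out : List Int) : Prop := out = get_eval_hours_alt hour_start hour_end day_start day_end month_start month_end
instance (hour_start : Int) (hour_end : Int) (day_start : Int) (day_end : Int) (month_start : Int) (month_end : Int) (out : List Int) : Decidable (Spec_get_eval_hours hour_start hour_end day_start day_end month_start month_end out) := by unfold Spec_get_eval_hours; infer_instance

-- ===== CLAIM (what is proved, stated in full; the proofs are below) =====
def Claim_equal_get_eval_hours : Prop := ∀ (hour_start : Int) (hour_end : Int) (day_start : Int) (day_end : Int) (month_start : Int) (month_end : Int), Dom_get_eval_hours hour_start hour_end day_start day_end month_start month_end → Spec_get_eval_hours hour_start hour_end day_start day_end month_start month_end (get_eval_hours hour_start hour_end day_start day_end month_start month_end)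

-- ===== LEMMAS AND PROOFS =====

-- number of valid days A's skip rules leave in month m (0-based)
def daysInM (m : Int) : Int :=
  if m = 2 then 28 else if m = 4 ∨ m = 6 ∨ m = 9 ∨ m = 10 then 30 else 31

-- valid calendar hours before month m
def pfxM (m : Int) : Int := 24 * ((PySem.List.pyRange 0 m 1).map daysInM).sum

-- A's innermost loop body, named so the loop lemmas can speak about it
def hBody (hs he1 ds de1 ms me1 m d : Int) : Int × List Int → Int → Int × List Int :=
  fun st h =>
    if m = 2 ∧ d > 27 then st
    else if (m = 4 ∨ m = 6 ∨ m = 9 ∨ m = 10) ∧ d > 29 then st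
    else
      let cnt := st.1 + 1
      if m ≥ ms ∧ m < me1 ∧ d ≥ ds ∧ d < de1 ∧ h ≥ hs ∧ h < he1 then
        (cnt, st.2 ++ [cnt])
      else (cnt, st.2)

lemma daysInM_pos (m : Int) : 0 < daysInM m := by
  unfold daysInM; split_ifs <;> norm_num

lemma daysInM_le (m : Int) : daysInM m ≤ 31 := by
  unfold daysInM; split_ifs <;> norm_num

lemma hour_loop (q : Int → Prop) [DecidablePred q] (n : Nat) : ∀ (c : Int) (acc : List Int),
    (PySem.List.pyRange 0 (n : Int) 1).foldl
      (fun st h => if q h then (st.1 + 1, st.2 ++ [st.1 + 1]) else (st.1 + 1, st.2)) (c, acc)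
    = (c + n, acc ++ (PySem.List.pyRange 0 (n : Int) 1).flatMap
        (fun h => if q h then [c + h + 1] else [])) := by
  induction n with
  | zero => intro c acc; simp [PySem.List.pyRange_one_eq_nil]
  | succ k ih =>
    intro c acc
    have hcast : ((k + 1 : Nat) : Int) = (k : Int) + 1 := by push_cast; ring
    rw [hcast, PySem.List.pyRange_one_succ_right (by positivity), List.foldl_append, ih,
      List.flatMap_append]
    simp only [List.foldl_cons, List.foldl_nil, List.flatMap_cons, List.flatMap_nil,
      List.append_nil]
    by_cases hq : q (k : Int) <;> simp [hq] <;> ring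

lemma day_loop (hs he1 ds de1 ms me1 m : Int) (hm : 0 ≤ m ∧ m < 12) (n : Nat) :
    (n : Int) ≤ 31 → ∀ (c : Int) (acc : List Int),
    (PySem.List.pyRange 0 (n : Int) 1).foldl
      (fun st d => (PySem.List.pyRange 0 24 1).foldl (hBody hs he1 ds de1 ms me1 m d) st)
      (c, acc)
    = (c + 24 * min (n : Int) (daysInM m),
       acc ++ (PySem.List.pyRange 0 (min (n : Int) (daysInM m)) 1).flatMap (fun d =>
         (PySem.List.pyRange 0 24 1).flatMap (fun h =>
           if m ≥ ms ∧ m < me1 ∧ d ≥ ds ∧ d < de1 ∧ h ≥ hs ∧ h < he1 then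
             [c + d * 24 + h + 1] else []))) := by
  induction n with
  | zero =>
    intro _ c acc
    have : min ((0:Nat):Int) (daysInM m) = 0 := by
      have := daysInM_pos m; omega
    simp [PySem.List.pyRange_one_eq_nil]
    exact le_of_lt (daysInM_pos m)
  | succ k ih =>
    intro hk c acc
    have hk' : (k : Int) ≤ 31 := by push_cast at hk ⊢; omega
    have hcast : ((k + 1 : Nat) : Int) = (k : Int) + 1 := by push_cast; ring
    rw [hcast, PySem.List.pyRange_one_succ_right (by positivity), List.foldl_append, ih hk']
    simp only [List.foldl_cons, List.foldl_nil]
    by_cases hvalid : (k : Int) < daysInM m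
    · -- valid day: full hour scan, counter advances by 24
      have h1 : ¬(m = 2 ∧ (k : Int) > 27) := by
        rintro ⟨rfl, hgt⟩; simp [daysInM] at hvalid; omega
      have h2 : ¬((m = 4 ∨ m = 6 ∨ m = 9 ∨ m = 10) ∧ (k : Int) > 29) := by
        rintro ⟨hm4, hgt⟩
        rcases hm4 with rfl | rfl | rfl | rfl <;> simp [daysInM] at hvalid <;> omega
      have hb : hBody hs he1 ds de1 ms me1 m (k : Int)
          = fun st h => if m ≥ ms ∧ m < me1 ∧ (k:Int) ≥ ds ∧ (k:Int) < de1 ∧ h ≥ hs ∧ h < he1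
              then (st.1 + 1, st.2 ++ [st.1 + 1]) else (st.1 + 1, st.2) := by
        funext st h; simp only [hBody, if_neg h1, if_neg h2]
      have hmin : min ((k:Int)) (daysInM m) = (k:Int) := by omega
      have hmin1 : min ((k:Int) + 1) (daysInM m) = (k:Int) + 1 := by omega
      have hc : c + 24 * min ((k:Int)) (daysInM m) = c + (k:Int) * 24 := by rw [hmin]; ring
      rw [hc, hb]
      have h24 := hour_loop
        (fun h => m ≥ ms ∧ m < me1 ∧ (k:Int) ≥ ds ∧ (k:Int) < de1 ∧ h ≥ hs ∧ h < he1) 24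
        (c + (k:Int) * 24)
      simp only [Nat.cast_ofNat] at h24
      rw [h24, hmin, hmin1, PySem.List.pyRange_one_succ_right (by positivity),
        List.flatMap_append]
      simp only [List.flatMap_cons, List.flatMap_nil, List.append_nil, List.append_assoc]
      have hfin : c + (k:Int) * 24 + 24 = c + 24 * ((k:Int) + 1) := by ring
      rw [hfin]
    · -- skipped day: the hour loop is the identity
      have hb : hBody hs he1 ds de1 ms me1 m (k : Int) = fun st _ => st := by
        funext st h
        by_cases hm2 : m = 2
        · have : (27:Int) < k := by simp [daysInM, hm2] at hvalid; omega
          simp [hBody, hm2, this]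
        · by_cases hm4 : m = 4 ∨ m = 6 ∨ m = 9 ∨ m = 10
          · have : (29:Int) < k := by
              rcases hm4 with rfl | rfl | rfl | rfl <;> simp [daysInM] at hvalid <;> omega
            simp [hBody, hm2, hm4, this]
          · exfalso; simp [daysInM, hm2, hm4] at hvalid; omega
      have hmin : min ((k:Int) + 1) (daysInM m) = min ((k:Int)) (daysInM m) := by
        have := daysInM_le m; omega
      rw [hb, hmin, PySem.List.foldl_ignore]

lemma pfxM_succ (m : Int) (hm : 0 ≤ m) : pfxM (m + 1) = pfxM m + 24 * daysInM m := by
  unfold pfxM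
  rw [PySem.List.pyRange_one_succ_right hm]
  simp
  ring

lemma month_loop (hs he1 ds de1 ms me1 : Int) (n : Nat) (hn : (n : Int) ≤ 12) :
    ∀ (c : Int) (acc : List Int),
    (PySem.List.pyRange 0 (n : Int) 1).foldl (fun st m =>
      (PySem.List.pyRange 0 31 1).foldl (fun st d =>
        (PySem.List.pyRange 0 24 1).foldl (hBody hs he1 ds de1 ms me1 m d) st) st) (c, acc)
    = (c + pfxM n,
       acc ++ (PySem.List.pyRange 0 (n : Int) 1).flatMap (fun m =>
         (PySem.List.pyRange 0 (daysInM m) 1).flatMap (fun d =>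
           (PySem.List.pyRange 0 24 1).flatMap (fun h =>
             if m ≥ ms ∧ m < me1 ∧ d ≥ ds ∧ d < de1 ∧ h ≥ hs ∧ h < he1 then
               [c + pfxM m + d * 24 + h + 1] else [])))) := by
  induction n with
  | zero =>
    intro c acc
    simp [PySem.List.pyRange_one_eq_nil, pfxM]
  | succ k ih =>
    intro c acc
    have hk' : (k : Int) ≤ 12 := by push_cast at hn ⊢; omega
    have hcast : ((k + 1 : Nat) : Int) = (k : Int) + 1 := by push_cast; ring
    rw [hcast, PySem.List.pyRange_one_succ_right (by positivity), List.foldl_append, ih hk']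
    simp only [List.foldl_cons, List.foldl_nil]
    have hmk : (0:Int) ≤ (k:Int) ∧ (k:Int) < 12 := by push_cast at hn; constructor <;> omega
    have hd := day_loop hs he1 ds de1 ms me1 (k:Int) hmk 31 (by norm_num) (c + pfxM k)
    simp only [Nat.cast_ofNat] at hd
    have hmin : min (31:Int) (daysInM (k:Int)) = daysInM (k:Int) := by
      have := daysInM_le (k:Int); have := daysInM_pos (k:Int); omega
    have h1 : c + pfxM (k:Int) + 24 * daysInM (k:Int) = c + pfxM ((k:Int) + 1) := by
      rw [pfxM_succ (k:Int) (by positivity)]; ring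
    rw [hd, hmin, h1, List.flatMap_append]
    simp only [List.flatMap_cons, List.flatMap_nil, List.append_nil, List.append_assoc]

lemma flatMap_congr' {l : List Int} {f g : Int → List Int} (h : ∀ x ∈ l, f x = g x) :
    l.flatMap f = l.flatMap g := by
  induction l with
  | nil => rfl
  | cons a t ih =>
    simp only [List.flatMap_cons, h a (by simp), ih (fun x hx => h x (by simp [hx]))]

lemma flatMap_if_and (P : Prop) [Decidable P] (q : Int → Prop) [DecidablePred q]
    (l : List Int) (f : Int → List Int) :
    l.flatMap (fun i => if P ∧ q i then f i else [])
    = if P then l.flatMap (fun i => if q i then f i else []) else [] := by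
  by_cases h : P <;> simp [h]

lemma interval_nat (N : Nat) (a b : Int) (f : Int → List Int) :
    (PySem.List.pyRange 0 (N : Int) 1).flatMap (fun i => if a ≤ i ∧ i < b then f i else [])
    = (PySem.List.pyRange (max 0 a) (min b (N : Int)) 1).flatMap f := by
  induction N with
  | zero =>
    rw [PySem.List.pyRange_one_eq_nil (by norm_num),
      PySem.List.pyRange_one_eq_nil (by omega)]
    rfl
  | succ k ih =>
    have hcast : ((k + 1 : Nat) : Int) = (k : Int) + 1 := by push_cast; ring
    rw [hcast, PySem.List.pyRange_one_succ_right (by positivity), List.flatMap_append, ih]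
    by_cases hbk : (k : Int) < b
    · by_cases hak : a ≤ (k : Int)
      · have hm1 : min b ((k:Int) + 1) = (k:Int) + 1 := by omega
        have hm0 : min b ((k:Int)) = (k:Int) := by omega
        rw [hm1, hm0, PySem.List.pyRange_one_succ_right (by omega), List.flatMap_append]
        simp [hak, hbk]
      · have e1 : PySem.List.pyRange (max 0 a) (min b ((k:Int) + 1)) 1 = [] :=
          PySem.List.pyRange_one_eq_nil (by omega)
        have e0 : PySem.List.pyRange (max 0 a) (min b ((k:Int))) 1 = [] :=
          PySem.List.pyRange_one_eq_nil (by omega)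
        rw [e1, e0]
        simp [hak]
    · have hm1 : min b ((k:Int) + 1) = min b ((k:Int)) := by omega
      rw [hm1]
      simp [hbk]

lemma interval_int (N a b : Int) (h0 : 0 ≤ N) (f : Int → List Int) :
    (PySem.List.pyRange 0 N 1).flatMap (fun i => if a ≤ i ∧ i < b then f i else [])
    = (PySem.List.pyRange (max 0 a) (min b N) 1).flatMap f := by
  have h : N = ((N.toNat : Nat) : Int) := by omega
  rw [h]; exact interval_nat N.toNat a b f

-- table lookups of B agree with the proof-side functions on valid months
lemma pvDaysB_eq (m : Int) (h0 : 0 ≤ m) (h12 : m < 12) :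
    PySem.List.pyGetD pvDaysB m 0 = daysInM m := by
  interval_cases m <;> decide

lemma pvPrefixB_eq (m : Int) (h0 : 0 ≤ m) (h12 : m < 12) :
    PySem.List.pyGetD pvPrefixB m 0 = pfxM m := by
  interval_cases m <;> decide

-- ===== VERDICT (by name: the statement is the Claim_ definition above) =====
theorem get_eval_hours_spec : Claim_equal_get_eval_hours := by
  intro hs he ds de ms me _
  unfold Spec_get_eval_hours
  -- clamped bounds
  set me1 : Int := if me > 12 then 12 else me with hme1
  set de1 : Int := if de > 31 then 31 else de with hde1
  set he1 : Int := if he > 24 then 24 else he with hhe1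
  -- Phase 1: A's triple loop with its running counter, characterised
  have hA : get_eval_hours hs he ds de ms me
      = ((PySem.List.pyRange 0 12 1).foldl (fun st m =>
          (PySem.List.pyRange 0 31 1).foldl (fun st d =>
            (PySem.List.pyRange 0 24 1).foldl (hBody hs he1 ds de1 ms me1 m d) st) st)
          ((0 : Int), ([] : List Int))).2 := rfl
  have hm12 := month_loop hs he1 ds de1 ms me1 12 (by norm_num) 0 []
  simp only [Nat.cast_ofNat] at hm12
  rw [hA, hm12]
  simp only [zero_add, List.nil_append]
  -- Phase 2: push the range conditions into the iteration bounds
  have step2 : (PySem.List.pyRange 0 12 1).flatMap (fun m =>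
        (PySem.List.pyRange 0 (daysInM m) 1).flatMap (fun d =>
          (PySem.List.pyRange 0 24 1).flatMap (fun h =>
            if m ≥ ms ∧ m < me1 ∧ d ≥ ds ∧ d < de1 ∧ h ≥ hs ∧ h < he1 then
              [pfxM m + d * 24 + h + 1] else [])))
      = (PySem.List.pyRange 0 12 1).flatMap (fun m =>
          if ms ≤ m ∧ m < me1 then
            (PySem.List.pyRange (max 0 ds) (min de1 (daysInM m)) 1).flatMap (fun d =>
              (PySem.List.pyRange (max 0 hs) (min he1 24) 1).map
                (fun h => pfxM m + d * 24 + h + 1))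
          else []) := by
    apply flatMap_congr'
    intro m _
    have e1 : ∀ d : Int,
        (PySem.List.pyRange 0 24 1).flatMap (fun h =>
          if m ≥ ms ∧ m < me1 ∧ d ≥ ds ∧ d < de1 ∧ h ≥ hs ∧ h < he1 then
            [pfxM m + d * 24 + h + 1] else [])
        = if (ms ≤ m ∧ m < me1) ∧ (ds ≤ d ∧ d < de1) then
            (PySem.List.pyRange (max 0 hs) (min he1 24) 1).map
              (fun h => pfxM m + d * 24 + h + 1)
          else [] := by
      intro d
      have hgrp : (fun h : Int =>
            if m ≥ ms ∧ m < me1 ∧ d ≥ ds ∧ d < de1 ∧ h ≥ hs ∧ h < he1 then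
              [pfxM m + d * 24 + h + 1] else ([] : List Int))
          = fun h : Int =>
            if ((ms ≤ m ∧ m < me1) ∧ (ds ≤ d ∧ d < de1)) ∧ (hs ≤ h ∧ h < he1) then
              [pfxM m + d * 24 + h + 1] else [] := by
        funext h; exact if_congr (by tauto) rfl rfl
      rw [hgrp, flatMap_if_and]
      have h24 := interval_nat 24 hs he1 (fun h => [pfxM m + d * 24 + h + 1])
      simp only [Nat.cast_ofNat] at h24
      rw [h24, ← List.map_eq_flatMap]
    rw [flatMap_congr' (fun d _ => e1 d),
      flatMap_if_and (ms ≤ m ∧ m < me1) (fun d => ds ≤ d ∧ d < de1),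
      interval_int (daysInM m) ds de1 (le_of_lt (daysInM_pos m))]
  rw [step2]
  have h12 := interval_nat 12 ms me1 (fun m =>
    (PySem.List.pyRange (max 0 ds) (min de1 (daysInM m)) 1).flatMap (fun d =>
      (PySem.List.pyRange (max 0 hs) (min he1 24) 1).map (fun h => pfxM m + d * 24 + h + 1)))
  simp only [Nat.cast_ofNat] at h12
  rw [h12]
  -- Phase 3: B's nested append loops are the same flatMaps
  unfold get_eval_hours_alt
  simp only [PySem.List.foldl_append_singleton_eq_map, PySem.List.foldl_append_eq_flatMap,
    List.nil_append]
  -- align the clamps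
  have hme : min me1 12 = min me 12 := by rw [hme1]; split_ifs <;> omega
  have hhe : min he1 24 = min he 24 := by rw [hhe1]; split_ifs <;> omega
  have hde : de1 = min de 31 := by rw [hde1]; split_ifs <;> omega
  rw [hme, hhe, hde]
  -- align the table lookups on valid months
  apply flatMap_congr'
  intro m hm
  rw [PySem.List.mem_pyRange_one] at hm
  have h0 : 0 ≤ m := le_trans (le_max_left 0 ms) hm.1
  have h12' : m < 12 := lt_of_lt_of_le hm.2 (min_le_right me 12)
  rw [pvDaysB_eq m h0 h12', pvPrefixB_eq m h0 h12']
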